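-- pv_equiv track=rewrite | github.com/Losshi/Advent-of-Code | AOC 2024/code_files/Day_02.py | isIncreasingByLimit
-- ===== SOURCE A (Python) =====
-- def isIncreasingByLimit(report):
--     for i in range(len(report)-1):
--         if report[i] >= report[i+1]:
--             return False
--         levelDiff = report[i+1] - report[i]
--         if levelDiff < 1 or levelDiff > 3:
--             return False
--     return True
-- ===== SOURCE B (Python) =====
-- def isIncreasingByLimit(report):
--     # Divide and conquer: a segment is valid iff both halves are valid and the
--     # junction pair steps up by 1..3.  Each adjacent pair is checked exactly once.
--     def ok(lo, hi):
--         if hi - lo < 2: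
--             return True
--         mid = (lo + hi) // 2
--         return ok(lo, mid) and ok(mid, hi) and 1 <= report[mid] - report[mid - 1] <= 3
--     return ok(0, len(report))
-- ===== Notes on version B (the rewrite author's own statement) =====
-- stated objective: alternative
-- what changed: Replaces A's linear index loop with early returns by a divide-and-conquer recursion: split the segment at its midpoint, validate both halves recursively, and check only the junction pair; each adjacent pair is verified exactly once but in a completely different (tree) order.
import Mathlib
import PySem

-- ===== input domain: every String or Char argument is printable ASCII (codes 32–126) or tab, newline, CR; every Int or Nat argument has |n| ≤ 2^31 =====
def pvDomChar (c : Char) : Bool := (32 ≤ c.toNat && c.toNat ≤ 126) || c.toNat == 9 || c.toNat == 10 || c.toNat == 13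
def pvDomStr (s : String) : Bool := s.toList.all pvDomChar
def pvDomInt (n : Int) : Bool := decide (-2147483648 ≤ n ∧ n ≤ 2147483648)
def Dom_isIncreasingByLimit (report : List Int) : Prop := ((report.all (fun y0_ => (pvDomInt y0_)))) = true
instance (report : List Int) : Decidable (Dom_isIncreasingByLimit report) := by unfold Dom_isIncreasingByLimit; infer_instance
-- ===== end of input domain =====

-- B replaces A's linear early-return index loop by a divide-and-conquer recursion
-- (validate both halves, check the midpoint junction pair): an alternative
-- decomposition with the same behaviour, not claimed faster.


-- ===== PORT A =====
-- A's loop over i in range(len-1) with early returns, as structural recursion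
-- over the adjacent pairs, branches in A's order.
def isIncreasingByLimitAux : List Int → Bool
  | x :: y :: rest =>
      if x ≥ y then false
      else
        let levelDiff := y - x
        if levelDiff < 1 ∨ levelDiff > 3 then false
        else isIncreasingByLimitAux (y :: rest)
  | _ => true

def isIncreasingByLimit (report : List Int) : Bool :=
  isIncreasingByLimitAux report

-- ===== PORT B =====
-- Source B's inner ok(lo, hi): lo, hi are always ≥ 0 so Nat carries them exactly
-- (Python's // on these nonnegative values is Nat division); report[mid] and
-- report[mid-1] are always in range at every call, so getD _ 0 is exact here.
def isIncreasingByLimitOk (report : List Int) (lo hi : Nat) : Bool :=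
  if hi - lo < 2 then true
  else
    let mid := (lo + hi) / 2
    isIncreasingByLimitOk report lo mid && isIncreasingByLimitOk report mid hi &&
      (decide (1 ≤ report.getD mid 0 - report.getD (mid - 1) 0) &&
       decide (report.getD mid 0 - report.getD (mid - 1) 0 ≤ 3))
  termination_by hi - lo
  decreasing_by all_goals omega

def isIncreasingByLimit_alt (report : List Int) : Bool :=
  isIncreasingByLimitOk report 0 report.length

-- ===== PRECONDITION & SPEC =====
def Spec_isIncreasingByLimit (report : List Int) (out : Bool) : Prop := out = isIncreasingByLimit_alt report
instance (report : List Int) (out : Bool) : Decidable (Spec_isIncreasingByLimit report out) := by unfold Spec_isIncreasingByLimit; infer_instance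

-- ===== CLAIM (what is proved, stated in full; the proofs are below) =====
def Claim_equal_isIncreasingByLimit : Prop := ∀ (report : List Int), Dom_isIncreasingByLimit report → Spec_isIncreasingByLimit report (isIncreasingByLimit report)

-- ===== LEMMAS AND PROOFS =====

-- The pair condition both programs check, at junction index i (pair (i, i+1)).
def pvPairOk (report : List Int) (i : Nat) : Prop :=
  1 ≤ report.getD (i + 1) 0 - report.getD i 0 ∧ report.getD (i + 1) 0 - report.getD i 0 ≤ 3

-- A's early-return loop accepts exactly the reports whose every adjacent
-- difference lies in [1,3] (x ≥ y is subsumed by diff < 1).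
theorem isIncreasingByLimitAux_iff (l : List Int) :
    isIncreasingByLimitAux l = true ↔ ∀ i, i + 1 < l.length → pvPairOk l i := by
  induction l with
  | nil => simp [isIncreasingByLimitAux]
  | cons x rest ih =>
    cases rest with
    | nil => simp [isIncreasingByLimitAux]
    | cons y rs =>
      simp only [isIncreasingByLimitAux]
      constructor
      · intro h i hi
        split_ifs at h with h1 h2
        match i with
        | 0 =>
          simp only [pvPairOk, List.getD_cons_succ, List.getD_cons_zero]
          omega
        | j + 1 =>
          have := (ih.mp h) j (by simpa using hi)
          simpa [pvPairOk, List.getD_cons_succ] using this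
      · intro h
        have h0 : pvPairOk (x :: y :: rs) 0 := h 0 (by simp)
        simp only [pvPairOk, List.getD_cons_succ, List.getD_cons_zero] at h0
        split_ifs with h1 h2
        · omega
        · omega
        · exact ih.mpr (fun j hj => by
            have := h (j + 1) (by simpa using hj)
            simpa [pvPairOk, List.getD_cons_succ] using this)

-- B's divide-and-conquer check on segment [lo, hi) accepts exactly the reports
-- whose every junction index i with lo ≤ i, i+1 < hi satisfies pvPairOk.
theorem isIncreasingByLimitOk_iff (report : List Int) :
    ∀ n lo hi, hi - lo ≤ n →
      (isIncreasingByLimitOk report lo hi = true ↔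
        ∀ i, lo ≤ i → i + 1 < hi → pvPairOk report i) := by
  intro n
  induction n with
  | zero =>
    intro lo hi h
    rw [isIncreasingByLimitOk]
    simp only [if_pos (by omega : hi - lo < 2), true_iff]
    intro i h1 h2; omega
  | succ n ih =>
    intro lo hi h
    rw [isIncreasingByLimitOk]
    split_ifs with hsmall
    · simp only [true_iff]
      intro i h1 h2; omega
    · have hmid1 : lo + 1 ≤ (lo + hi) / 2 := by omega
      have hmid2 : (lo + hi) / 2 + 1 ≤ hi := by omega
      rw [Bool.and_eq_true, Bool.and_eq_true, Bool.and_eq_true,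
        ih lo ((lo + hi) / 2) (by omega), ih ((lo + hi) / 2) hi (by omega),
        decide_eq_true_eq, decide_eq_true_eq]
      have hj : (lo + hi) / 2 - 1 + 1 = (lo + hi) / 2 := by omega
      constructor
      · rintro ⟨⟨hL, hR⟩, hc1, hc2⟩ i h1 h2
        rcases Nat.lt_trichotomy (i + 1) ((lo + hi) / 2) with hlt | heq | hgt
        · exact hL i h1 hlt
        · have hi' : i = (lo + hi) / 2 - 1 := by omega
          subst hi'
          simp only [pvPairOk]
          rw [hj]
          exact ⟨hc1, hc2⟩
        · exact hR i (by omega) h2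
      · intro hall
        have hjunc := hall ((lo + hi) / 2 - 1) (by omega) (by omega)
        simp only [pvPairOk] at hjunc
        rw [hj] at hjunc
        exact ⟨⟨fun i h1 h2 => hall i h1 (by omega),
                fun i h1 h2 => hall i (by omega) h2⟩, hjunc.1, hjunc.2⟩

-- ===== VERDICT (by name: the statement is the Claim_ definition above) =====
theorem isIncreasingByLimit_spec : Claim_equal_isIncreasingByLimit := by
  intro report _
  unfold Spec_isIncreasingByLimit isIncreasingByLimit isIncreasingByLimit_alt
  apply Bool.eq_iff_iff.mpr
  rw [isIncreasingByLimitAux_iff,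
    isIncreasingByLimitOk_iff report report.length 0 report.length (by omega)]
  exact ⟨fun h i _ h2 => h i h2, fun h i h2 => h i (Nat.zero_le i) h2⟩
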